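-- pv_equiv track=rewrite | github.com/Devaretanmay/TESSERA | src/tessera/classifier/rule_based.py | _matches_sequence
-- ===== SOURCE A (Python) =====
-- def _matches_sequence(
--
--     required_inds: list[str],
--     per_hop_indicators: list[list[str]],
-- ) -> bool:
--     """Check if required indicators appear in sequence across hops.
--
--     For rag_to_tool: first hop needs instruction_override, later hop needs tool_parameter_manipulation.
--     """
--     n_hops = len(per_hop_indicators)
--     n_required = len(required_inds)
--
--     if n_required > n_hops:
--         return False
--
--     # Try to find each required indicator in order across the hop sequence
--     last_matched_pos = -1
--     for required_ind in required_inds: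
--         found = False
--         for pos in range(last_matched_pos + 1, n_hops):
--             if required_ind in per_hop_indicators[pos]:
--                 last_matched_pos = pos
--                 found = True
--                 break
--         if not found:
--             return False
--
--     return True
-- ===== SOURCE B (Python) =====
-- def _matches_sequence(
--     required_inds: list[str],
--     per_hop_indicators: list[list[str]],
-- ) -> bool:
--     """Build an inverted index (indicator -> ascending list of hop positions)
--     in one pass, then chain lookups: for each required indicator take the first
--     indexed position after the previously taken one."""
--     positions = {}
--     for pos, hop in enumerate(per_hop_indicators):
--         for ind in dict.fromkeys(hop):
--             positions.setdefault(ind, []).append(pos)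
--     last = -1
--     for req in required_inds:
--         nxt = None
--         for p in positions.get(req, []):
--             if p > last:
--                 nxt = p
--                 break
--         if nxt is None:
--             return False
--         last = nxt
--     return True
-- ===== Notes on version B (the rewrite author's own statement) =====
-- stated objective: alternative
-- what changed: Replaced A's per-indicator rescan of the hop array (nested loop from last_matched_pos+1 with an early length guard) by a staged algorithm: one pass builds an inverted index mapping each indicator to its ascending list of hop positions, then a chaining pass takes for each required indicator the first indexed position after the previous one; the length guard is subsumed.
import Mathlib
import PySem

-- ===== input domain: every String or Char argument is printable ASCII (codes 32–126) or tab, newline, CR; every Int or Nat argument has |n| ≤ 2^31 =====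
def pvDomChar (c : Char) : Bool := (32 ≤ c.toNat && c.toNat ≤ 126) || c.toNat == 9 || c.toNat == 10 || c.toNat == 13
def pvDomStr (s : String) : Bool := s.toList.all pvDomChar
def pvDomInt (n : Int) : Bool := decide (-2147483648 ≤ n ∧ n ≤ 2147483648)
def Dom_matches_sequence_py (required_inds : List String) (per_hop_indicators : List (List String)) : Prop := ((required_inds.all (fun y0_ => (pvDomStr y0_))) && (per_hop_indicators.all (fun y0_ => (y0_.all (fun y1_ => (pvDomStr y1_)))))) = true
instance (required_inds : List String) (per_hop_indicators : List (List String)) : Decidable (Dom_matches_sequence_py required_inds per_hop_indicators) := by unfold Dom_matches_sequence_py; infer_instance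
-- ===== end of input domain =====

-- B replaces A's per-indicator rescan of the hop array by two stages: build an
-- inverted index (indicator -> ascending hop positions), then chain lookups
-- through it; objective: alternative (same behaviour, different algorithm).

-- ===== PORT A =====
-- inner loop: 'for pos in range(last_matched_pos + 1, n_hops): if required_ind in per_hop_indicators[pos]: … break'
def msInner (required_ind : String) (hops : List (List String)) : List Int → Option Int
  | [] => none
  | pos :: rest =>
    if ((PySem.List.pyGet? hops pos).getD []).contains required_ind then some pos
    else msInner required_ind hops rest

-- outer loop: 'for required_ind in required_inds: … if not found: return False'
def msOuter (hops : List (List String)) : List String → Int → Bool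
  | [], _ => true
  | required_ind :: rest, last_matched_pos =>
    match msInner required_ind hops (PySem.List.pyRange (last_matched_pos + 1) (hops.length : Int) 1) with
    | some pos => msOuter hops rest pos
    | none => false

def matches_sequence_py (required_inds : List String) (per_hop_indicators : List (List String)) : Bool :=
  if ((required_inds.length : Int) > (per_hop_indicators.length : Int)) then false
  else msOuter per_hop_indicators required_inds (-1)

-- ===== PORT B =====
-- 'for pos, hop in enumerate(...): for ind in dict.fromkeys(hop): positions.setdefault(ind, []).append(pos)'
def bIndex (hops : List (List String)) : PySem.Dict String (List Int) :=
  (hops.foldl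
    (fun s hop =>
      ((PySem.List.dedup hop).foldl (fun d ind => d.modify ind [] (fun l => l ++ [s.2])) s.1,
       s.2 + 1))
    (PySem.Dict.empty, (0 : Int))).1

-- 'for p in positions.get(req, []): if p > last: nxt = p; break'
def bFind (last : Int) : List Int → Option Int
  | [] => none
  | p :: rest => if last < p then some p else bFind last rest

-- 'for req in required_inds: …'
def bChase (positions : PySem.Dict String (List Int)) : List String → Int → Bool
  | [], _ => true
  | req :: rest, last =>
    match bFind last (positions.getD req []) with
    | some p => bChase positions rest p
    | none => false

def matches_sequence_py_alt (required_inds : List String) (per_hop_indicators : List (List String)) : Bool :=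
  bChase (bIndex per_hop_indicators) required_inds (-1)

-- ===== PRECONDITION & SPEC =====
def Spec_matches_sequence_py (required_inds : List String) (per_hop_indicators : List (List String)) (out : Bool) : Prop := out = matches_sequence_py_alt required_inds per_hop_indicators
instance (required_inds : List String) (per_hop_indicators : List (List String)) (out : Bool) : Decidable (Spec_matches_sequence_py required_inds per_hop_indicators out) := by unfold Spec_matches_sequence_py; infer_instance

-- ===== CLAIM (what is proved, stated in full; the proofs are below) =====
def Claim_equal_matches_sequence_py : Prop := ∀ (required_inds : List String) (per_hop_indicators : List (List String)), Dom_matches_sequence_py required_inds per_hop_indicators → Spec_matches_sequence_py required_inds per_hop_indicators (matches_sequence_py required_inds per_hop_indicators)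

-- ===== LEMMAS AND PROOFS =====

-- reference position list: P r l k = ascending positions (from k) of sublists of l containing r
def posP (r : String) : List (List String) → Int → List Int
  | [], _ => []
  | h :: t, k => (if h.contains r then [k] else []) ++ posP r t (k + 1)

lemma mem_posP {r : String} : ∀ {l : List (List String)} {k p : Int},
    p ∈ posP r l k → k ≤ p ∧ p < k + l.length := by
  intro l
  induction l with
  | nil => intro k p h; simp [posP] at h
  | cons h t ih =>
    intro k p hp
    simp only [posP, List.mem_append] at hp
    rcases hp with hp | hp
    · split at hp
      · simp at hp
        subst hp; constructor <;> simp
      · simp at hp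
    · have := ih hp; simp; omega

lemma posP_append (r : String) : ∀ (l₁ l₂ : List (List String)) (k : Int),
    posP r (l₁ ++ l₂) k = posP r l₁ k ++ posP r l₂ (k + l₁.length) := by
  intro l₁
  induction l₁ with
  | nil => intro l₂ k; simp [posP]
  | cons h t ih =>
    intro l₂ k
    simp only [List.cons_append, posP, ih, List.append_assoc, List.length_cons]
    have : k + ((t.length : Int) + 1) = k + ((t.length + 1 : Nat) : Int) := by push_cast; ring
    rw [show k + 1 + (t.length : Int) = k + ((t.length : Int) + 1) from by ring, this]

-- dedup filter fact
lemma filter_beq_nodup (r : String) : ∀ (l : List String), l.Nodup →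
    l.filter (fun x => x == r) = if r ∈ l then [r] else [] := by
  intro l
  induction l with
  | nil => intro _; simp
  | cons x t ih =>
    intro hnd
    rcases List.nodup_cons.mp hnd with ⟨hx, hnt⟩
    by_cases hxr : x = r
    · subst hxr
      simp [ih hnt, hx]
    · simp only [List.filter_cons]
      rw [if_neg (by simp [hxr])]
      rw [ih hnt]
      simp [Ne.symm hxr]

-- the inner loop over one hop appends this hop's position to the r-entry iff r ∈ hop
lemma getD_innerFold (r : String) (hop : List String) (d : PySem.Dict String (List Int)) (k : Int) :
    ((PySem.List.dedup hop).foldl (fun d ind => d.modify ind [] (fun l => l ++ [k])) d).getD r []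
      = d.getD r [] ++ (if hop.contains r then [k] else []) := by
  have h1 : (PySem.List.dedup hop).foldl (fun d ind => d.modify ind [] (fun l => l ++ [k])) d
      = ((PySem.List.dedup hop).map (fun ind => (ind, k))).foldl
          (fun d p => d.modify p.1 [] (fun l => l ++ [p.2])) d := by
    rw [List.foldl_map]
  rw [h1, PySem.Dict.getD_foldl_modify_append]
  congr 1
  rw [List.filter_map]
  have : (fun (p : String × Int) => p.1 == r) ∘ (fun ind => (ind, k)) = fun x => x == r := rfl
  rw [this, filter_beq_nodup r _ (PySem.List.nodup_dedup hop)]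
  by_cases hm : r ∈ hop
  · simp [hm]
  · simp [hm]

-- the inverted index's entry at r is posP
lemma getD_bIndexAux (r : String) : ∀ (hops : List (List String)) (d : PySem.Dict String (List Int)) (k : Int),
    ((hops.foldl
      (fun s hop =>
        ((PySem.List.dedup hop).foldl (fun d ind => d.modify ind [] (fun l => l ++ [s.2])) s.1,
         s.2 + 1)) (d, k)).1).getD r []
      = d.getD r [] ++ posP r hops k := by
  intro hops
  induction hops with
  | nil => intro d k; simp [posP]
  | cons hop t ih =>
    intro d k
    simp only [List.foldl_cons]
    rw [ih, getD_innerFold, posP, List.append_assoc]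

lemma getD_bIndex (r : String) (hops : List (List String)) :
    (bIndex hops).getD r [] = posP r hops 0 := by
  unfold bIndex
  rw [getD_bIndexAux]
  simp [PySem.Dict.getD_empty]

-- bFind is find?
lemma bFind_eq_find? (last : Int) : ∀ l : List Int,
    bFind last l = l.find? (fun p => decide (last < p)) := by
  intro l
  induction l with
  | nil => rfl
  | cons p rest ih =>
    simp only [bFind, List.find?]
    by_cases h : last < p <;> simp [h, ih]

-- two small find? helpers
lemma find?_append_of_none {α : Type} {p : α → Bool} : ∀ {l1 : List α} (l2 : List α),
    l1.find? p = none → (l1 ++ l2).find? p = l2.find? p := by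
  intro l1
  induction l1 with
  | nil => intro l2 _; rfl
  | cons x t ih =>
    intro l2 h
    rw [List.find?_cons] at h
    cases hx : p x with
    | true => rw [hx] at h; simp at h
    | false =>
      rw [hx] at h
      simp only [List.cons_append, List.find?_cons, hx]
      exact ih l2 h

lemma find?_congr_mem {α : Type} {p q : α → Bool} : ∀ {l : List α},
    (∀ x ∈ l, p x = q x) → l.find? p = l.find? q := by
  intro l
  induction l with
  | nil => intro _; rfl
  | cons x t ih =>
    intro h
    simp only [List.find?_cons, h x (by simp)]
    cases q x
    · exact ih (fun y hy => h y (by simp [hy]))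
    · rfl

-- inner equality: scanning the index tail = A's inner scan over range
lemma find_posP_eq_msInner (r : String) (hops : List (List String)) :
    ∀ (d a : Nat), a ≤ hops.length → hops.length - a ≤ d →
      (posP r (hops.drop a) (a : Int)).find? (fun p => decide ((a : Int) - 1 < p))
        = msInner r hops (PySem.List.pyRange (a : Int) (hops.length : Int) 1) := by
  intro d
  induction d with
  | zero =>
    intro a ha hd
    have : a = hops.length := by omega
    subst this
    rw [List.drop_length, PySem.List.pyRange_one_eq_nil (le_refl _)]
    rfl
  | succ d ihd =>
    intro a ha hd
    rcases Nat.lt_or_ge a hops.length with hlt | hge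
    · rw [← List.getElem_cons_drop hlt,
        PySem.List.pyRange_one_cons (by exact_mod_cast hlt)]
      simp only [posP, msInner, PySem.List.pyGet?_natCast]
      rw [List.getElem?_eq_getElem hlt]
      simp only [Option.getD_some]
      by_cases hc : hops[a].contains r
      · rw [if_pos hc, if_pos hc]
        simp
      · rw [if_neg hc, if_neg hc]
        simp only [List.nil_append]
        have hcg : (posP r (hops.drop (a + 1)) ((a : Int) + 1)).find? (fun p => decide ((a : Int) - 1 < p))
            = (posP r (hops.drop (a + 1)) ((a : Int) + 1)).find? (fun p => decide (((a + 1 : Nat) : Int) - 1 < p)) := by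
          apply find?_congr_mem
          intro x hx
          have := mem_posP hx
          push_cast
          simp only [decide_eq_decide]
          omega
        rw [hcg]
        have := ihd (a + 1) hlt (by omega)
        rw [show (((a + 1 : Nat)) : Int) = (a : Int) + 1 by push_cast; ring] at this
        exact this
    · have : a = hops.length := by omega
      subst this
      rw [List.drop_length, PySem.List.pyRange_one_eq_nil (le_refl _)]
      rfl

-- full index find = suffix find (prefix positions all fail the test)
lemma find_posP_full (r : String) (hops : List (List String)) (a : Nat) (ha : a ≤ hops.length) :
    (posP r hops 0).find? (fun p => decide ((a : Int) - 1 < p))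
      = (posP r (hops.drop a) (a : Int)).find? (fun p => decide ((a : Int) - 1 < p)) := by
  conv_lhs => rw [← List.take_append_drop a hops]
  rw [posP_append]
  have hlen : ((hops.take a).length : Int) = (a : Int) := by
    rw [List.length_take]; exact_mod_cast congrArg Nat.cast (Nat.min_eq_left ha)
  rw [show (0 : Int) + ((hops.take a).length : Int) = (a : Int) by rw [hlen]; ring]
  apply find?_append_of_none
  apply List.find?_eq_none.mpr
  intro x hx
  have := mem_posP hx
  have hxa : x < (a : Int) := by
    have h2 := this.2
    rw [show (0 : Int) + ((hops.take a).length : Int) = ((hops.take a).length : Int) by ring] at h2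
    omega
  simp
  omega

lemma chase_eq_msOuter (hops : List (List String)) : ∀ (reqs : List String) (a : Nat),
    a ≤ hops.length →
    bChase (bIndex hops) reqs ((a : Int) - 1) = msOuter hops reqs ((a : Int) - 1) := by
  intro reqs
  induction reqs with
  | nil => intro a _; rfl
  | cons r rs ih =>
    intro a ha
    simp only [bChase, msOuter, bFind_eq_find?, getD_bIndex]
    rw [find_posP_full r hops a ha,
      show (a : Int) - 1 + 1 = (a : Int) by ring,
      find_posP_eq_msInner r hops (hops.length - a) a ha (le_refl _)]
    cases hfind : msInner r hops (PySem.List.pyRange (a : Int) (hops.length : Int) 1) with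
    | none => rfl
    | some p =>
      have hmem : p ∈ posP r (hops.drop a) (a : Int) := by
        apply List.mem_of_find?_eq_some
        rw [find_posP_eq_msInner r hops (hops.length - a) a ha (le_refl _)]
        exact hfind
      have hb := mem_posP hmem
      rw [List.length_drop] at hb
      have hp0 : (a : Int) ≤ p := hb.1
      have hpn : p < (hops.length : Int) := by
        have := hb.2; push_cast at this; omega
      have hpt : p = ((p.toNat : Nat) : Int) := by omega
      have := ih (p.toNat + 1) (by omega)
      rw [show ((p.toNat + 1 : Nat) : Int) - 1 = p by omega] at this
      exact this

-- if the chain completes, there were at least as many hops beyond last as requirements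
lemma chase_length (hops : List (List String)) : ∀ (reqs : List String) (last : Int),
    reqs ≠ [] → bChase (bIndex hops) reqs last = true →
    (reqs.length : Int) + last + 1 ≤ (hops.length : Int) := by
  intro reqs
  induction reqs with
  | nil => intro last h; exact absurd rfl h
  | cons r rs ih =>
    intro last _ hc
    simp only [bChase, bFind_eq_find?, getD_bIndex] at hc
    cases hfind : (posP r hops 0).find? (fun p => decide (last < p)) with
    | none => rw [hfind] at hc; simp at hc
    | some p =>
      rw [hfind] at hc
      have hmem := mem_posP (List.mem_of_find?_eq_some hfind)
      have hlp : last < p := by simpa using List.find?_some hfind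
      have hpn : p < (hops.length : Int) := by have := hmem.2; omega
      by_cases hrs : rs = []
      · subst hrs; simp; omega
      · have := ih p hrs hc
        simp only [List.length_cons]
        push_cast
        omega

-- ===== VERDICT (by name: the statement is the Claim_ definition above) =====
theorem matches_sequence_py_spec : Claim_equal_matches_sequence_py := by
  intro reqs hops _
  unfold Spec_matches_sequence_py matches_sequence_py matches_sequence_py_alt
  split
  · next hgt =>
    by_cases hb : bChase (bIndex hops) reqs (-1) = true
    · have hne : reqs ≠ [] := by
        intro h; subst h; simp at hgt; omega
      have := chase_length hops reqs (-1) hne hb; omega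
    · simp at hb; exact hb.symm
  · next hle =>
    have := chase_eq_msOuter hops reqs 0 (Nat.zero_le _)
    simpa using this.symm
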